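-- pv_equiv track=rewrite | github.com/sbogdan/codejam | 2016/1A/A/A.py | solve
-- ===== SOURCE A (Python) =====
-- def solve(s):
--     ans = ""
--     for x in s:
--         if not ans:
--             ans = x
--         elif x >= ans[0]:
--             ans = x + ans
--         else:
--             ans = ans + x
--     return ans
-- ===== SOURCE B (Python) =====
-- def _is_record(s, i):
--     # s[i] goes to the front iff it is >= every earlier character
--     return i == 0 or max(s[:i]) <= s[i]
--
--
-- def solve(s):
--     n = len(s)
--     front = [s[i] for i in range(n) if _is_record(s, i)]
--     back = [s[i] for i in range(n) if not _is_record(s, i)]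
--     return ''.join(reversed(front)) + ''.join(back)
-- ===== Notes on version B (the rewrite author's own statement) =====
-- stated objective: alternative
-- what changed: replaces A's stateful incremental prepend/append build with a stateless positional characterization: char s[i] belongs to the front iff s[j] <= s[i] for every j < i, and the answer is assembled once as reverse(front) + back
import Mathlib
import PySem

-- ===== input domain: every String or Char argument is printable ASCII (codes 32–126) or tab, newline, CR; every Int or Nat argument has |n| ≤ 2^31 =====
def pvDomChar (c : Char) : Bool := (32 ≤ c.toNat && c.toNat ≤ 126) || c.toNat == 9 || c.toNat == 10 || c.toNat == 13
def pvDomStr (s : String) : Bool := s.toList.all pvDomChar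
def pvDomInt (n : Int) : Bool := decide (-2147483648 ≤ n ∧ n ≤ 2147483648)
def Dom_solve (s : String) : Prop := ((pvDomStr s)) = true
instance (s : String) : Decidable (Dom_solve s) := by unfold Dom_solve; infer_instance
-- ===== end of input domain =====

-- B drops A's incremental prepend/append build entirely: it classifies each position i
-- statelessly (s[i] goes to the front iff s[j] <= s[i] for every j < i) and assembles
-- the answer once as reverse(front) ++ back (alternative decomposition, not faster).


-- ===== PORT A =====
-- ans is the answer string as a list of chars; 'x + ans' is cons, 'ans + x' is append.
def solveStep (ans : List Char) (x : Char) : List Char :=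
  match ans with
  | [] => [x]
  | h :: _ => if h ≤ x then x :: ans else ans ++ [x]

def solve (s : String) : String :=
  String.mk (s.toList.foldl solveStep [])

-- ===== PORT B =====
-- _is_record(s, i): i == 0 or max(s[:i]) <= s[i]; for i > 0 the slice is nonempty so
-- max? is always some; indices are always in range, so getD with a dummy default is exact.
def isRecord (l : List Char) (i : Nat) : Bool :=
  i == 0 ||
    (match PySem.List.max? (l.take i) (fun c => c) with
     | some m => decide (m ≤ l.getD i ' ')
     | none => false)

def frontL (l : List Char) : List Char :=
  ((List.range l.length).filter (fun i => isRecord l i)).map (fun i => l.getD i ' ')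

def backL (l : List Char) : List Char :=
  ((List.range l.length).filter (fun i => !isRecord l i)).map (fun i => l.getD i ' ')

def solve_alt (s : String) : String :=
  String.mk ((frontL s.toList).reverse ++ backL s.toList)

-- ===== PRECONDITION & SPEC =====
def Spec_solve (s : String) (out : String) : Prop := out = solve_alt s
instance (s : String) (out : String) : Decidable (Spec_solve s out) := by unfold Spec_solve; infer_instance

-- ===== CLAIM (what is proved, stated in full; the proofs are below) =====
def Claim_equal_solve : Prop := ∀ (s : String), Dom_solve s → Spec_solve s (solve s)

-- ===== LEMMAS AND PROOFS =====

theorem getD_append_lt (l : List Char) (x : Char) (j : Nat) (hj : j < l.length) :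
    (l ++ [x]).getD j ' ' = l.getD j ' ' := by
  simp [List.getD, List.getElem?_append_left hj]

theorem getD_append_self (l : List Char) (x : Char) :
    (l ++ [x]).getD l.length ' ' = x := by
  simp [List.getD]

theorem isRecord_append_lt (l : List Char) (x : Char) (i : Nat) (hi : i < l.length) :
    isRecord (l ++ [x]) i = isRecord l i := by
  unfold isRecord
  rw [List.take_append_of_le_length (le_of_lt hi), getD_append_lt l x i hi]

theorem isRecord_append_self (l : List Char) (x : Char) :
    isRecord (l ++ [x]) l.length = true ↔ ∀ c ∈ l, c ≤ x := by
  unfold isRecord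
  rw [List.take_append_of_le_length (le_refl l.length), List.take_length,
    getD_append_self]
  rcases l with _ | ⟨a, t⟩
  · simp
  · rcases hm : PySem.List.max? (a :: t) (fun c => c) with _ | m
    · exact absurd ((PySem.List.max?_eq_none_iff _ _).mp hm) (by simp)
    · constructor
      · intro h c hc
        have hx : m ≤ x := by simpa using h
        exact le_trans (PySem.List.max?_isMax hm c hc) hx
      · intro h
        simpa using h m (PySem.List.max?_mem hm)

theorem frontL_append (l : List Char) (x : Char) :
    frontL (l ++ [x]) =
      frontL l ++ (if isRecord (l ++ [x]) l.length then [x] else []) := by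
  unfold frontL
  rw [List.length_append, List.length_singleton, List.range_succ, List.filter_append,
    List.map_append]
  congr 1
  · rw [List.filter_congr (fun i hi => ?_)]
    · apply List.map_congr_left
      intro i hi
      exact getD_append_lt l x i (List.mem_range.mp (List.mem_of_mem_filter hi))
    · rw [isRecord_append_lt l x i (List.mem_range.mp hi)]
  · by_cases h : isRecord (l ++ [x]) l.length <;>
      simp [h]

theorem backL_append (l : List Char) (x : Char) :
    backL (l ++ [x]) =
      backL l ++ (if isRecord (l ++ [x]) l.length then [] else [x]) := by
  unfold backL
  rw [List.length_append, List.length_singleton, List.range_succ, List.filter_append,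
    List.map_append]
  congr 1
  · rw [List.filter_congr (fun i hi => ?_)]
    · apply List.map_congr_left
      intro i hi
      exact getD_append_lt l x i (List.mem_range.mp (List.mem_of_mem_filter hi))
    · rw [isRecord_append_lt l x i (List.mem_range.mp hi)]
  · by_cases h : isRecord (l ++ [x]) l.length <;>
      simp [h]

-- full loop invariant: representation + the head of A's answer is a maximum of the prefix
theorem main_inv (l : List Char) :
    l.foldl solveStep [] = (frontL l).reverse ++ backL l ∧
    (l ≠ [] → l.foldl solveStep [] ≠ []) ∧
    (∀ hd tl, l.foldl solveStep [] = hd :: tl → hd ∈ l ∧ ∀ c ∈ l, c ≤ hd) := by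
  induction l using List.reverseRecOn with
  | nil => simp [frontL, backL]
  | append_singleton l x ih =>
    obtain ⟨hrep, hne, hmax⟩ := ih
    rw [List.foldl_append, List.foldl_cons, List.foldl_nil, hrep]
    rcases l with _ | ⟨a, l'⟩
    · refine ⟨?_, by simp [solveStep, frontL, backL], ?_⟩
      · simp [solveStep, frontL, backL, isRecord]
      · intro hd tl h
        simp [solveStep, frontL, backL] at h
        simp [h.1]
    · set L := a :: l' with hL
      have hres := hrep
      obtain ⟨hd, tl, hcons⟩ : ∃ hd tl, (frontL L).reverse ++ backL L = hd :: tl := by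
        rcases h : (frontL L).reverse ++ backL L with _ | ⟨hd, tl⟩
        · exact absurd (hrep.trans h) (hne (by simp [hL]))
        · exact ⟨hd, tl, rfl⟩
      obtain ⟨hmem, hub⟩ := hmax hd tl (hrep.trans hcons)
      rw [hcons]
      by_cases hc : hd ≤ x
      · have hrec : isRecord (L ++ [x]) L.length = true :=
          (isRecord_append_self L x).mpr (fun c hc' => le_trans (hub c hc') hc)
        refine ⟨?_, by simp [solveStep, hc], ?_⟩
        · simp [solveStep, hc, frontL_append, backL_append, hrec, ← hcons]
        · intro hd' tl' h
          simp [solveStep, hc] at h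
          refine ⟨by simp [h.1], ?_⟩
          intro c hcm
          rcases List.mem_append.mp hcm with h' | h'
          · exact h.1 ▸ le_trans (hub c h') hc
          · simp at h'; simp [h', h.1]
      · have hrec : isRecord (L ++ [x]) L.length = false := by
          rw [Bool.eq_false_iff, Ne, isRecord_append_self]
          intro h; exact hc (h hd hmem)
        refine ⟨?_, by simp [solveStep, hc], ?_⟩
        · simp [solveStep, hc, frontL_append, backL_append, hrec, ← hcons]
        · intro hd' tl' h
          simp [solveStep, hc] at h
          obtain ⟨h1, _⟩ := h
          refine ⟨List.mem_append.mpr (Or.inl (h1 ▸ hmem)), ?_⟩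
          intro c hcm
          rcases List.mem_append.mp hcm with h' | h'
          · exact h1 ▸ hub c h'
          · simp at h'; exact h1 ▸ h' ▸ (lt_of_not_ge hc).le

-- ===== VERDICT (by name: the statement is the Claim_ definition above) =====
theorem solve_spec : Claim_equal_solve := by
  intro s _
  unfold Spec_solve solve solve_alt
  rw [(main_inv s.toList).1]
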